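-- pv_equiv track=rewrite | github.com/liyanc/Flash3DTransformer | flash3dxfmr/psh/bucket_scope.py | generate_swin_scopes
-- ===== SOURCE A (Python) =====
-- import math
-- from typing import List, Union
--
-- def generate_swin_scopes(total_N: int, buck_size: int, scope_size: int, offset: int = 0) -> List[List[int]]:
--     """
--     Generates disjoint sliding scopes ("swin_scopes") for attention in a circular manner.
--
--     Each scope is a contiguous block of 'scope_size' bucket indices, and together
--     the scopes form a non-overlapping partition of the indices [0, N) where
--     N = ceil(total_N / buck_size). The first scope starts at 'offset', and subsequent
--     scopes follow sequentially. If the scopes reach the end of the bucket range, they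
--     wrap around to the beginning.
--
--     Note:
--         For non-overlapping scopes, it is required that N (the number of buckets) is divisible
--         by scope_size.
--
--     Parameters:
--         total_N (int): Total number of elements.
--         buck_size (int): Bucket size used to compute the number of buckets.
--         scope_size (int): Number of consecutive indices in each scope.
--         offset (int): Starting offset for the first scope.
--
--     Returns:
--         List[List[int]]: A list of scopes, each a list of 'scope_size' indices.
--
--     Raises:
--         AssertionError: If scope_size is greater than the number of buckets or if N is not
--                         divisible by scope_size.
--     """
--     # Compute the number of buckets.
--     N = int(math.ceil(total_N / buck_size))
--     assert scope_size <= N, "scope_size must be less than or equal to the number of buckets (N)"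
--     # For non-overlapping scopes, N must be divisible by scope_size.
--     assert N % scope_size == 0, "For non-overlapping scopes, the number of buckets N must be divisible by scope_size"
--
--     attn_scopes = []
--     num_scopes = N // scope_size
--     for i in range(num_scopes):
--         start = (offset + i * scope_size) % N
--         indices = [(start + j) % N for j in range(scope_size)]
--         attn_scopes.append(indices)
--
--     return attn_scopes
-- ===== SOURCE B (Python) =====
-- import math
-- from typing import List
--
-- def generate_swin_scopes(total_N: int, buck_size: int, scope_size: int, offset: int = 0) -> List[List[int]]:
--     N = int(math.ceil(total_N / buck_size))
--     assert scope_size <= N, "scope_size must be less than or equal to the number of buckets (N)"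
--     assert N % scope_size == 0, "For non-overlapping scopes, the number of buckets N must be divisible by scope_size"
--     # One flat circular rotation starting at offset, then chunk it.
--     seq = [(offset + k) % N for k in range(N)]
--     return [seq[i * scope_size:(i + 1) * scope_size] for i in range(N // scope_size)]
-- ===== Notes on version B (the rewrite author's own statement) =====
-- stated objective: simpler
-- what changed: Replaces the per-scope modular start computation and inner modular comprehension by building the full circular rotation [(offset+k)%N for k in range(N)] once and chunking it into consecutive scope_size slices.
import Mathlib
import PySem

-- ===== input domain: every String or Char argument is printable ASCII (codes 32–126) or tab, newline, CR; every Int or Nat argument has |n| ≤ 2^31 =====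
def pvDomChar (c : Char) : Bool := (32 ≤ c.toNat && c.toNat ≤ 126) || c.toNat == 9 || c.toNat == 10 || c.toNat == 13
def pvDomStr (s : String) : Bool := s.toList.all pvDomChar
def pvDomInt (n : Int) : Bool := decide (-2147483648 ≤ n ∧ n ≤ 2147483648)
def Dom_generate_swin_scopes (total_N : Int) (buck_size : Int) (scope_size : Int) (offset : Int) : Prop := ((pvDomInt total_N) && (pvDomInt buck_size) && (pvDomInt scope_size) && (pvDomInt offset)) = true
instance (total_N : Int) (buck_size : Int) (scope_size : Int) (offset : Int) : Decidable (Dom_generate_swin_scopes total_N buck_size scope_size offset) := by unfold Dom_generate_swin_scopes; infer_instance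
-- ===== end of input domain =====

-- B replaces the per-scope modular start computation by one flat circular rotation
-- followed by chunking into consecutive slices (objective: simpler decomposition).

-- Shared helper: N = int(math.ceil(total_N / buck_size)).  For |total_N|,|buck_size| ≤ 2^31 the
-- float ceil is exact and equals the integer ceiling division -((-total_N) // buck_size).
def pvCeilN (total_N : Int) (buck_size : Int) : Int :=
  -(PySem.Int.floordiv (-total_N) buck_size)

-- ===== PORT A =====
def generate_swin_scopes (total_N : Int) (buck_size : Int) (scope_size : Int) (offset : Int) : List (List Int) :=
  let N := pvCeilN total_N buck_size
  let num_scopes := PySem.Int.floordiv N scope_size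
  (PySem.List.pyRange 0 num_scopes 1).foldl (fun acc i =>
    let start := PySem.Int.mod (offset + i * scope_size) N
    let indices := (PySem.List.pyRange 0 scope_size 1).map (fun j => PySem.Int.mod (start + j) N)
    acc ++ [indices]) []

-- ===== PORT B =====
def generate_swin_scopes_alt (total_N : Int) (buck_size : Int) (scope_size : Int) (offset : Int) : List (List Int) :=
  let N := pvCeilN total_N buck_size
  let seq := (PySem.List.pyRange 0 N 1).map (fun k => PySem.Int.mod (offset + k) N)
  (PySem.List.pyRange 0 (PySem.Int.floordiv N scope_size) 1).map (fun i =>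
    PySem.List.slice seq (some (i * scope_size)) (some ((i + 1) * scope_size)))

-- ===== PRECONDITION & SPEC =====
-- Pre_ excludes exactly the inputs on which A raises: buck_size = 0 (ZeroDivisionError in the
-- float division), a failing assert, and scope_size = 0 (ZeroDivisionError in 'N % scope_size').
def Pre_generate_swin_scopes (total_N : Int) (buck_size : Int) (scope_size : Int) (offset : Int) : Prop :=
  buck_size ≠ 0 ∧ scope_size ≠ 0 ∧ scope_size ≤ pvCeilN total_N buck_size ∧
    PySem.Int.mod (pvCeilN total_N buck_size) scope_size = 0

instance (total_N : Int) (buck_size : Int) (scope_size : Int) (offset : Int) : Decidable (Pre_generate_swin_scopes total_N buck_size scope_size offset) := by unfold Pre_generate_swin_scopes; infer_instance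

def pvWitness_generate_swin_scopes : Int × Int × Int × Int := (10, 2, 5, 3)

def Spec_generate_swin_scopes (total_N : Int) (buck_size : Int) (scope_size : Int) (offset : Int) (out : List (List Int)) : Prop := out = generate_swin_scopes_alt total_N buck_size scope_size offset
instance (total_N : Int) (buck_size : Int) (scope_size : Int) (offset : Int) (out : List (List Int)) : Decidable (Spec_generate_swin_scopes total_N buck_size scope_size offset out) := by unfold Spec_generate_swin_scopes; infer_instance

-- ===== CLAIM (what is proved, stated in full; the proofs are below) =====
def Claim_equal_generate_swin_scopes : Prop := ∀ (total_N : Int) (buck_size : Int) (scope_size : Int) (offset : Int), Dom_generate_swin_scopes total_N buck_size scope_size offset → Pre_generate_swin_scopes total_N buck_size scope_size offset → Spec_generate_swin_scopes total_N buck_size scope_size offset (generate_swin_scopes total_N buck_size scope_size offset)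

-- ===== LEMMAS AND PROOFS =====


theorem generate_swin_scopes_main (N s offset : Int) (hs : 0 < s) (hsN : s ≤ N)
    (hdvd : s ∣ N) :
    ((PySem.List.pyRange 0 (PySem.Int.floordiv N s) 1).foldl (fun acc i =>
      acc ++ [(PySem.List.pyRange 0 s 1).map
        (fun j => PySem.Int.mod (PySem.Int.mod (offset + i * s) N + j) N)]) [])
    = (PySem.List.pyRange 0 (PySem.Int.floordiv N s) 1).map (fun i =>
        PySem.List.slice ((PySem.List.pyRange 0 N 1).map (fun k => PySem.Int.mod (offset + k) N))
          (some (i * s)) (some ((i + 1) * s))) := by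
  have hN : 0 < N := lt_of_lt_of_le hs hsN
  obtain ⟨m, hm⟩ := hdvd
  have hfd : PySem.Int.floordiv N s = m := by
    rw [PySem.Int.floordiv_eq_ediv_of_pos hs, hm, Int.mul_ediv_cancel_left _ (ne_of_gt hs)]
  rw [PySem.List.foldl_append_singleton_eq_map, List.nil_append]
  apply List.map_congr_left
  intro i hi
  rw [PySem.List.mem_pyRange_one] at hi
  have his : 0 ≤ i * s := mul_nonneg hi.1 (le_of_lt hs)
  have hadd : (i + 1) * s = i * s + s := by ring
  have hi1s : 0 ≤ (i + 1) * s := by omega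
  have hub : (i + 1) * s ≤ N := by
    rw [hm, mul_comm s m, hfd] at *
    exact mul_le_mul_of_nonneg_right (by omega) (le_of_lt hs)
  rw [PySem.List.slice_toNat _ his hi1s]
  apply List.ext_getElem
  · simp only [List.length_map, PySem.List.length_pyRange_one, List.length_take,
      List.length_drop]
    omega
  · intro k h1 h2
    simp only [List.getElem_map, List.getElem_take, List.getElem_drop,
      PySem.List.getElem_pyRange_one]
    have hcast : (((i * s).toNat + k : Nat) : Int) = i * s + (k : Int) := by
      push_cast; omega
    simp only [PySem.Int.mod_eq_emod_of_pos hN, zero_add, hcast, Int.emod_add_emod]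
    congr 1
    ring

-- ===== VERDICT (by name: the statement is the Claim_ definition above) =====
theorem generate_swin_scopes_spec : Claim_equal_generate_swin_scopes := by
  intro tN bs ss off _ hpre
  obtain ⟨hb, hs0, hsle, hmod⟩ := hpre
  unfold Spec_generate_swin_scopes generate_swin_scopes generate_swin_scopes_alt
  have hdvd : ss ∣ pvCeilN tN bs := (PySem.Int.mod_eq_zero_iff_dvd _ ss).mp hmod
  rcases lt_trichotomy ss 0 with hneg | hz | hpos
  · rcases lt_trichotomy (pvCeilN tN bs) 0 with hNneg | hN0 | hNpos
    · -- N < 0: the asserts force N = ss; one scope, which is empty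
      have hle : pvCeilN tN bs ≤ ss := by
        have h := Int.le_of_dvd (by omega : 0 < -(pvCeilN tN bs))
          ((neg_dvd).mpr ((dvd_neg).mpr hdvd))
        omega
      have hEq : ss = pvCeilN tN bs := le_antisymm hsle hle
      have hfd : PySem.Int.floordiv (pvCeilN tN bs) ss = 1 := by
        rw [← hEq]; simp only [PySem.Int.floordiv]; exact Int.fdiv_self hs0
      have hr01 : PySem.List.pyRange 0 1 1 = [0] := by decide
      simp [hfd, hr01, PySem.List.pyRange_one_eq_nil (le_of_lt hneg),
        PySem.List.pyRange_one_eq_nil (le_of_lt hNneg), PySem.List.slice]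
    · -- N = 0: zero scopes
      rw [hN0]
      simp [PySem.Int.floordiv, PySem.List.pyRange_one_eq_nil (le_refl (0:Int))]
    · -- N > 0, ss < 0: num_scopes ≤ 0, both return []
      have h1 := PySem.Int.floordiv_mul_add_mod (pvCeilN tN bs) ss
      have h2 := PySem.Int.mod_neg_bounds (pvCeilN tN bs) hneg
      have hq : PySem.Int.floordiv (pvCeilN tN bs) ss ≤ 0 := by
        by_contra hq
        rw [not_le] at hq
        have h3 : PySem.Int.floordiv (pvCeilN tN bs) ss * ss ≤ 1 * ss :=
          mul_le_mul_of_nonpos_right (by omega) (le_of_lt hneg)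
        rw [one_mul] at h3
        omega
      simp [PySem.List.pyRange_one_eq_nil hq]
  · exact absurd hz hs0
  · exact generate_swin_scopes_main (pvCeilN tN bs) ss off hpos hsle hdvd
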